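-- pv_equiv track=rewrite | github.com/Sky-MedalSoft/pythonProject | day0813/Demo3-C.py | has_odd_product_pair
-- ===== SOURCE A (Python) =====
-- def has_odd_product_pair(sequence):
--     # 获取序列长度
--     n = len(sequence)
--
--     # 遍历序列中的每一对不同的数
--     for i in range(n):
--         for j in range(i + 1, n):
--             # 获取当前的一堆数
--             a, b = sequence[i], sequence[j]
--             # 检查这对数的乘积是否为奇数
--             if (a * b) % 2 != 0:
--                 return True
--     return False
-- ===== SOURCE B (Python) =====
-- def has_odd_product_pair(sequence):
--     # A product a*b is odd exactly when both factors are odd, so a pair with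
--     # odd product exists iff the sequence contains at least two odd numbers.
--     seen_odd = False
--     for x in sequence:
--         if x % 2 != 0:
--             if seen_odd:
--                 return True
--             seen_odd = True
--     return False
-- ===== Notes on version B (the rewrite author's own statement) =====
-- stated objective: faster
-- what changed: Replaces the nested pair scan with a single pass counting odd elements: a product is odd iff both factors are odd, so a pair exists iff at least two odds occur.
import Mathlib
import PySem

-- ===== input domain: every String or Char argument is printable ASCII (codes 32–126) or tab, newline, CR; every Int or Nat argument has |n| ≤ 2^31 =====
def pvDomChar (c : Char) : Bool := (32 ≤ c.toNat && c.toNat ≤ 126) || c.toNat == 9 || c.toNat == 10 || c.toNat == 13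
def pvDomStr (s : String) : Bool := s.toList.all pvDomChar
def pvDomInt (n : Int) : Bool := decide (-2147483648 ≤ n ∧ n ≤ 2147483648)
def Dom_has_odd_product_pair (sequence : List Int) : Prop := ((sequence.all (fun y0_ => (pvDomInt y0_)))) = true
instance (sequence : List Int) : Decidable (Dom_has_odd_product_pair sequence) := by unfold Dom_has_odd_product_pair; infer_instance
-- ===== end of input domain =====

-- B replaces A's O(n^2) nested pair scan with one O(n) pass counting odd elements
-- (a product is odd iff both factors are odd), returning whether at least two odds occur.

-- ===== PORT A =====
def has_odd_product_pair (sequence : List Int) : Bool :=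
  let n : Int := PySem.List.len sequence
  (PySem.List.pyRange 0 n 1).any (fun i =>
    (PySem.List.pyRange (i + 1) n 1).any (fun j =>
      let a := PySem.List.pyGetD sequence i 0
      let b := PySem.List.pyGetD sequence j 0
      PySem.Int.mod (a * b) 2 != 0))

-- ===== PORT B =====
-- the for-loop of Source B with its early return: seen_odd is the accumulator
def pvAltGo : List Int → Bool → Bool
  | [], _ => false
  | x :: t, seen_odd =>
    if PySem.Int.mod x 2 != 0 then
      (if seen_odd then true else pvAltGo t true)
    else pvAltGo t seen_odd

def has_odd_product_pair_alt (sequence : List Int) : Bool :=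
  pvAltGo sequence false

-- ===== PRECONDITION & SPEC =====
def Spec_has_odd_product_pair (sequence : List Int) (out : Bool) : Prop := out = has_odd_product_pair_alt sequence
instance (sequence : List Int) (out : Bool) : Decidable (Spec_has_odd_product_pair sequence out) := by unfold Spec_has_odd_product_pair; infer_instance

-- ===== CLAIM (what is proved, stated in full; the proofs are below) =====
def Claim_equal_has_odd_product_pair : Prop := ∀ (sequence : List Int), Dom_has_odd_product_pair sequence → Spec_has_odd_product_pair sequence (has_odd_product_pair sequence)

-- ===== LEMMAS AND PROOFS =====

/-- proof helper: the odd-test A and B both apply. -/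
def pvOddb (x : Int) : Bool := PySem.Int.mod x 2 != 0

/-- proof helper: an index-free restatement of A's nested pair scan. -/
def pvPairsAny : List Int → Bool
  | [] => false
  | x :: t => (pvOddb x && t.any pvOddb) || pvPairsAny t

theorem pv_mod_mul_two (a b : Int) :
    (PySem.Int.mod (a * b) 2 != 0) = (pvOddb a && pvOddb b) := by
  simp only [pvOddb, PySem.Int.mod_eq_emod_of_pos (by norm_num : (0:Int) < 2)]
  rcases Int.emod_two_eq a with h | h <;> rcases Int.emod_two_eq b with h' | h' <;>
    simp [Int.mul_emod, h, h']

theorem pv_any_const_and (c : Bool) (q : Int → Bool) (t : List Int) :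
    (t.any fun b => c && q b) = (c && t.any q) := by
  cases c <;> simp

theorem pv_outer (s : List Int) : ∀ (m k : Nat), s.length - k = m →
    ((PySem.List.pyRange (k : Int) (PySem.List.len s) 1).any (fun i =>
      (PySem.List.pyRange (i + 1) (PySem.List.len s) 1).any (fun j =>
        let a := PySem.List.pyGetD s i 0
        let b := PySem.List.pyGetD s j 0
        PySem.Int.mod (a * b) 2 != 0)))
    = pvPairsAny (s.drop k) := by
  intro m
  induction m with
  | zero =>
    intro k hk
    have hle : s.length ≤ k := by omega
    rw [PySem.List.pyRange_one_eq_nil (by simp only [PySem.List.len_eq]; exact_mod_cast hle)]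
    rw [List.drop_of_length_le hle]
    rfl
  | succ m ih =>
    intro k hk
    have hlt : k < s.length := by omega
    rw [PySem.List.pyRange_one_cons (by simp only [PySem.List.len_eq]; exact_mod_cast hlt)]
    rw [List.any_cons]
    have hcast : (k : Int) + 1 = ((k + 1 : Nat) : Int) := by push_cast; ring
    -- rewrite the tail of the outer loop via the induction hypothesis
    rw [hcast, ih (k + 1) (by omega)]
    -- the head: the inner loop over j ∈ range(k+1, n)
    have hgetk : PySem.List.pyGetD s (k : Int) 0 = s[k] := by
      simp [List.getD_eq_getElem?_getD, List.getElem?_eq_getElem hlt]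
    have hmap : (PySem.List.pyRange ((k + 1 : Nat) : Int) (PySem.List.len s) 1).map
        (fun j => PySem.List.pyGetD s j 0) = s.drop (k + 1) := by
      have := PySem.List.map_pyGetD_pyRange s (0 : Int) (a := ((k + 1 : Nat) : Int))
        (by positivity)
      simpa using this
    have hinner : (PySem.List.pyRange (((k + 1 : Nat)) : Int) (PySem.List.len s) 1).any (fun j =>
        let a := PySem.List.pyGetD s (k : Int) 0
        let b := PySem.List.pyGetD s j 0
        PySem.Int.mod (a * b) 2 != 0)
        = (pvOddb s[k] && (s.drop (k + 1)).any pvOddb) := by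
      simp only [pv_mod_mul_two, hgetk]
      calc (PySem.List.pyRange ((k + 1 : Nat) : Int) (PySem.List.len s) 1).any
              (fun j => pvOddb s[k] && pvOddb (PySem.List.pyGetD s j 0))
          = ((PySem.List.pyRange ((k + 1 : Nat) : Int) (PySem.List.len s) 1).map
              (fun j => PySem.List.pyGetD s j 0)).any
              (fun b => pvOddb s[k] && pvOddb b) := by
            rw [List.any_map]; rfl
        _ = (s.drop (k + 1)).any (fun b => pvOddb s[k] && pvOddb b) := by rw [hmap]
        _ = (pvOddb s[k] && (s.drop (k + 1)).any pvOddb) :=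
            pv_any_const_and _ _ _
    rw [hinner]
    rw [List.drop_eq_getElem_cons hlt]
    rfl

theorem pv_pairsAny_eq_count (s : List Int) :
    pvPairsAny s = decide (2 ≤ s.countP pvOddb) := by
  induction s with
  | nil => simp [pvPairsAny]
  | cons x t ih =>
    have hany : t.any pvOddb = decide (0 < t.countP pvOddb) := by
      rw [Bool.eq_iff_iff]
      simp [List.any_eq_true, List.countP_pos_iff]
    rw [pvPairsAny, ih, hany, List.countP_cons]
    by_cases hx : pvOddb x = true
    · rw [Bool.eq_iff_iff]
      simp only [hx, if_true, Bool.true_and, Bool.or_eq_true, decide_eq_true_eq]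
      omega
    · simp [hx]

theorem pv_altGo_eq_count (s : List Int) : ∀ (seen : Bool),
    pvAltGo s seen = decide (2 ≤ (if seen then 1 else 0) + s.countP pvOddb) := by
  induction s with
  | nil => intro seen; cases seen <;> rfl
  | cons x t ih =>
    intro seen
    rw [pvAltGo, List.countP_cons]
    by_cases hx : (PySem.Int.mod x 2 != 0) = true
    · have hx' : pvOddb x = true := hx
      rw [if_pos hx]
      cases seen
      · rw [if_neg (by simp), ih true, hx', Bool.eq_iff_iff]
        simp only [decide_eq_true_eq, Bool.false_eq_true, if_false, if_true]
        omega
      · rw [if_pos rfl, hx']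
        exact (decide_eq_true (by simp only [reduceIte]; omega)).symm
    · have hx' : pvOddb x = false := by simpa [pvOddb] using hx
      rw [if_neg hx, ih seen, hx']
      simp

theorem pv_alt_eq_count (s : List Int) :
    has_odd_product_pair_alt s = decide (2 ≤ s.countP pvOddb) := by
  unfold has_odd_product_pair_alt
  rw [pv_altGo_eq_count s false]
  simp

-- ===== VERDICT (by name: the statement is the Claim_ definition above) =====
theorem has_odd_product_pair_spec : Claim_equal_has_odd_product_pair := by
  intro s _
  unfold Spec_has_odd_product_pair has_odd_product_pair
  have h := pv_outer s s.length 0 (by omega)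
  simp only [Nat.cast_zero] at h
  rw [h, List.drop_zero, pv_pairsAny_eq_count, pv_alt_eq_count]
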